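-- pv_equiv track=rewrite | github.com/snirgreen-debug/binary2name | bin2name/server_side/binary2name/POCs/generate_usable_functions.py | generate_usable_funcs_names_list
-- ===== SOURCE A (Python) =====
-- from typing import List, Dict, Set
--
-- def generate_usable_funcs_names_list(names_list: List[str], token_hist: Dict[str, int],
--                                 threshold: int, delimiter: str="_") -> List[str]:
--     """
--     Generate a list of all the usable function names in the dataset.
--     A function is considered usable if all of its tokens appear at least k times in the database.
--
--         :param names_list: list of all function names in the dataset
--         :type names_list: List[str]
--         :param token_hist: a dictionary from each token to it's occurence count
--         :type token_hist: Dict[str, int]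
--         :param threshold: minimal k value
--         :type threshold: int
--         :param delimiter: delimiters seperating tokens in the dataset's function names, defaults to "_"
--         :type delimiter: str, optional
--         :return: list of all the usable function names in the dataset
--         :rtype: List[str]
--     """
--     usable_functions: List[str] = []
--     for name in names_list:
--         tokens = name.split(delimiter)
--         if all([token in token_hist and token_hist[token] >= threshold for token in tokens]) \
--             and name not in usable_functions:
--             usable_functions.append(name)
--
--     usable_functions.sort() # Sort for compatibility with old format
--     return usable_functions
-- ===== SOURCE B (Python) =====
-- def generate_usable_funcs_names_list(names_list, token_hist, threshold, delimiter="_"):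
--     result = []
--     prev = None
--     for name in sorted(names_list):
--         if name == prev:
--             continue
--         prev = name
--         if all(token_hist.get(token, threshold - 1) >= threshold
--                for token in name.split(delimiter)):
--             result.append(name)
--     return result
-- ===== Notes on version B (the rewrite author's own statement) =====
-- stated objective: alternative
-- what changed: B sorts the names first and then makes one pass over the sorted list, skipping any name equal to the previously seen one (adjacent-duplicate dedup) and testing each token with dict.get and a failing default, whereas A filters in input order with an O(n) 'name not in list' membership scan for dedup and sorts at the end.
import Mathlib
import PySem

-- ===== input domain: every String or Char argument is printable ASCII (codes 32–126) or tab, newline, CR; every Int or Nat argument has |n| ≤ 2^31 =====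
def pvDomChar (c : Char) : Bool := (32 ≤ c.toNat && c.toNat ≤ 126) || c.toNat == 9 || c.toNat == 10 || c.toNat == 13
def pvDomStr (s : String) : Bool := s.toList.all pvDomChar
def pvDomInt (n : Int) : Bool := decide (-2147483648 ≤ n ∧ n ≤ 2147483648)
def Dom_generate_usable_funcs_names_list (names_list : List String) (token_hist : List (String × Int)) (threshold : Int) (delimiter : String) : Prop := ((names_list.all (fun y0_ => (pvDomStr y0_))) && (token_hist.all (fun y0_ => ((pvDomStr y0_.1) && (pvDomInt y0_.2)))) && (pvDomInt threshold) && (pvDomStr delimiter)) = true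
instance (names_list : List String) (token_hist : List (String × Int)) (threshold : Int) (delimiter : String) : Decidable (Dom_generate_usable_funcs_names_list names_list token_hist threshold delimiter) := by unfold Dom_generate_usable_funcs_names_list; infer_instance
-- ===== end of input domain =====

-- B sorts the names first and dedups by skipping a name equal to the previous one in a single pass,
-- instead of A's filter-with-linear-membership-scan dedup followed by a final sort (alternative).

-- ===== PORT A =====
-- name.split(delimiter): split? is none exactly when delimiter = "" (Python ValueError); Pre_ excludes that.
def generate_usable_funcs_names_list (names_list : List String) (token_hist : List (String × Int)) (threshold : Int) (delimiter : String) : List String :=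
  let usable : List String := names_list.foldl (fun acc name =>
    let tokens := (PySem.Str.split? name delimiter).getD []
    if tokens.all (fun token =>
          match (PySem.Dict.mk token_hist).get? token with
          | some c => decide (c ≥ threshold)
          | none => false) && !(acc.contains name)
    then acc ++ [name] else acc) []
  PySem.List.sorted usable (fun x => x) false

-- ===== PORT B =====
-- loop state = (result, prev); 'continue' when name == prev, else prev := name and conditional append
def generate_usable_funcs_names_list_alt (names_list : List String) (token_hist : List (String × Int)) (threshold : Int) (delimiter : String) : List String :=
  ((PySem.List.sorted names_list (fun x => x) false).foldl
    (fun (s : List String × Option String) name =>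
      if s.2 = some name then s
      else if ((PySem.Str.split? name delimiter).getD []).all
              (fun token => decide ((PySem.Dict.mk token_hist).getD token (threshold - 1) ≥ threshold))
           then (s.1 ++ [name], some name)
           else (s.1, some name))
    ([], none)).1

-- ===== PRECONDITION & SPEC =====
-- Pre_ excludes only delimiter = "" with a nonempty names_list: there name.split("") raises ValueError in both programs.
def Pre_generate_usable_funcs_names_list (names_list : List String) (token_hist : List (String × Int)) (threshold : Int) (delimiter : String) : Prop :=
  names_list = [] ∨ delimiter ≠ ""
instance (names_list : List String) (token_hist : List (String × Int)) (threshold : Int) (delimiter : String) : Decidable (Pre_generate_usable_funcs_names_list names_list token_hist threshold delimiter) := by unfold Pre_generate_usable_funcs_names_list; infer_instance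

def pvWitness_generate_usable_funcs_names_list : List String × (List (String × Int)) × Int × String :=
  (["a_b", "a", "c"], [("a", 2), ("b", 1)], 1, "_")

def Spec_generate_usable_funcs_names_list (names_list : List String) (token_hist : List (String × Int)) (threshold : Int) (delimiter : String) (out : List String) : Prop := out = generate_usable_funcs_names_list_alt names_list token_hist threshold delimiter
instance (names_list : List String) (token_hist : List (String × Int)) (threshold : Int) (delimiter : String) (out : List String) : Decidable (Spec_generate_usable_funcs_names_list names_list token_hist threshold delimiter out) := by unfold Spec_generate_usable_funcs_names_list; infer_instance

-- ===== CLAIM (what is proved, stated in full; the proofs are below) =====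
def Claim_equal_generate_usable_funcs_names_list : Prop := ∀ (names_list : List String) (token_hist : List (String × Int)) (threshold : Int) (delimiter : String), Dom_generate_usable_funcs_names_list names_list token_hist threshold delimiter → Pre_generate_usable_funcs_names_list names_list token_hist threshold delimiter → Spec_generate_usable_funcs_names_list names_list token_hist threshold delimiter (generate_usable_funcs_names_list names_list token_hist threshold delimiter)

-- ===== LEMMAS AND PROOFS =====

-- A's dedup-while-appending loop under a filter predicate is a foldl of Set.add over the filtered list.
theorem pv_foldl_dedup_eq (P : String → Bool) (names : List String) (acc : List String) :
    names.foldl (fun acc name => if P name && !(acc.contains name) then acc ++ [name] else acc) acc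
      = (names.filter P).foldl PySem.Set.add acc := by
  induction names generalizing acc with
  | nil => rfl
  | cons n ns ih =>
      by_cases h : P n = true
      · rw [List.foldl_cons, List.filter_cons_of_pos h, List.foldl_cons, ih]
        congr 1
        simp only [h, Bool.true_and, PySem.Set.add]
        by_cases hm : acc.contains n = true <;> simp [hm]
      · rw [List.foldl_cons, List.filter_cons_of_neg (by simpa using h)]
        have hcond : (P n && !(acc.contains n)) = false := by
          simp only [Bool.not_eq_true] at h; simp [h]
        rw [hcond]
        simpa using ih acc

-- B's per-token test (dict.get with a failing default) equals A's guarded lookup test.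
theorem pv_tok_eq (token_hist : List (String × Int)) (threshold : Int) :
    (fun token => decide ((PySem.Dict.mk token_hist).getD token (threshold - 1) ≥ threshold))
      = (fun token =>
          match (PySem.Dict.mk token_hist).get? token with
          | some c => decide (c ≥ threshold)
          | none => false) := by
  funext t
  have h : (PySem.Dict.mk token_hist).getD t (threshold - 1)
      = ((PySem.Dict.mk token_hist).get? t).getD (threshold - 1) := by
    simp [PySem.Dict.getD]
  rw [h]
  cases (PySem.Dict.mk token_hist).get? t with
  | none => simp
  | some c => simp

-- B's loop as a pure recursion on the remaining names, given the previously seen name.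
def pvDedupF (P : String → Bool) : List String → Option String → List String
  | [], _ => []
  | x :: xs, prev =>
      if prev = some x then pvDedupF P xs prev
      else (if P x then [x] else []) ++ pvDedupF P xs (some x)

theorem pv_foldl_eq_dedupF (P : String → Bool) (ys : List String) (acc : List String) (prev : Option String) :
    (ys.foldl (fun (s : List String × Option String) name =>
        if s.2 = some name then s
        else if P name then (s.1 ++ [name], some name) else (s.1, some name)) (acc, prev)).1
      = acc ++ pvDedupF P ys prev := by
  induction ys generalizing acc prev with
  | nil => simp [pvDedupF]
  | cons x xs ih =>
      simp only [List.foldl_cons, pvDedupF]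
      by_cases h : prev = some x
      · simp [h, ih]
      · by_cases hP : P x = true <;> simp [h, hP, ih]

-- On a nondecreasing list, B's pass keeps exactly the distinct P-names (not blocked by prev), strictly increasing.
theorem pv_dedupF_spec (P : String → Bool) (ys : List String) (prev : Option String)
    (hs : ys.Pairwise (· ≤ ·)) (hp : ∀ p, prev = some p → ∀ x ∈ ys, p ≤ x) :
    (∀ x, x ∈ pvDedupF P ys prev ↔ (x ∈ ys ∧ P x = true ∧ prev ≠ some x))
      ∧ (pvDedupF P ys prev).Pairwise (· < ·) := by
  induction ys generalizing prev with
  | nil => simp [pvDedupF]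
  | cons y ys ih =>
      have hs' : ys.Pairwise (· ≤ ·) := hs.tail
      have hy : ∀ x ∈ ys, y ≤ x := fun x hx => (List.pairwise_cons.mp hs).1 x hx
      have hp' : ∀ p, (some y : Option String) = some p → ∀ x ∈ ys, p ≤ x := by
        intro p hpy x hx; cases hpy; exact hy x hx
      obtain ⟨hm, hpw⟩ := ih (some y) hs' hp'
      by_cases h : prev = some y
      · subst h
        have hunf : pvDedupF P (y :: ys) (some y) = pvDedupF P ys (some y) := by
          simp [pvDedupF]
        rw [hunf]
        refine ⟨?_, hpw⟩
        intro x
        rw [hm x]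
        constructor
        · rintro ⟨hx, hPx, hne⟩; exact ⟨List.mem_cons_of_mem _ hx, hPx, hne⟩
        · rintro ⟨hx, hPx, hne⟩
          rcases List.mem_cons.mp hx with rfl | hx'
          · exact absurd rfl hne
          · exact ⟨hx', hPx, hne⟩
      · have hunf : pvDedupF P (y :: ys) prev
            = (if P y then [y] else []) ++ pvDedupF P ys (some y) := by
          simp [pvDedupF, h]
        rw [hunf]
        constructor
        · intro x
          rw [List.mem_append, hm x]
          constructor
          · rintro (hx | ⟨hx, hPx, hne⟩)
            · have hPy : P y = true ∧ x = y := by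
                by_cases hPy : P y = true
                · exact ⟨hPy, by simpa [hPy] using hx⟩
                · simp [hPy] at hx
              obtain ⟨hPy, rfl⟩ := hPy
              exact ⟨List.mem_cons_self .., hPy, h⟩
            · refine ⟨List.mem_cons_of_mem _ hx, hPx, ?_⟩
              intro hpx
              have hle : x ≤ y := hp x hpx y (List.mem_cons_self ..)
              have hge : y ≤ x := hy x hx
              exact h ((le_antisymm hle hge) ▸ hpx)
          · rintro ⟨hx, hPx, hne⟩
            by_cases hxy : x = y
            · subst hxy; exact Or.inl (by simp [hPx])
            · have hx' : x ∈ ys := by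
                rcases List.mem_cons.mp hx with he | hx'
                · exact absurd he hxy
                · exact hx'
              exact Or.inr ⟨hx', hPx, fun hc => hxy (Option.some.inj hc).symm⟩
        · by_cases hPy : P y = true
          · rw [if_pos hPy, List.singleton_append]
            refine List.pairwise_cons.mpr ⟨?_, hpw⟩
            intro x hx
            obtain ⟨hxys, _, hneq⟩ := (hm x).mp hx
            exact lt_of_le_of_ne (hy x hxys) (fun he => hneq (by rw [he]))
          · rw [if_neg hPy]; simpa using hpw

-- ===== VERDICT (by name: the statement is the Claim_ definition above) =====
theorem generate_usable_funcs_names_list_spec : Claim_equal_generate_usable_funcs_names_list := by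
  intro names_list token_hist threshold delimiter _hdom _hpre
  show generate_usable_funcs_names_list names_list token_hist threshold delimiter
      = generate_usable_funcs_names_list_alt names_list token_hist threshold delimiter
  set P : String → Bool := fun name =>
    ((PySem.Str.split? name delimiter).getD []).all (fun token =>
      match (PySem.Dict.mk token_hist).get? token with
      | some c => decide (c ≥ threshold)
      | none => false) with hPdef
  have hA : generate_usable_funcs_names_list names_list token_hist threshold delimiter
      = PySem.List.sorted (PySem.Set.ofList (names_list.filter P)) (fun x => x) false := by
    simp only [generate_usable_funcs_names_list]
    rw [pv_foldl_dedup_eq P, ← PySem.Set.ofList_eq_foldl]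
  have hB : generate_usable_funcs_names_list_alt names_list token_hist threshold delimiter
      = pvDedupF P (PySem.List.sorted names_list (fun x => x) false) none := by
    simp only [generate_usable_funcs_names_list_alt, hPdef, pv_tok_eq token_hist threshold]
    exact pv_foldl_eq_dedupF _ _ [] none
  rw [hA, hB]
  have hs : (PySem.List.sorted names_list (fun x => x) false).Pairwise (· ≤ ·) :=
    PySem.List.sorted_pairwise names_list (fun x => x)
  obtain ⟨hm, hpw⟩ := pv_dedupF_spec P (PySem.List.sorted names_list (fun x => x) false) none hs
    (by intro p hp; cases hp)
  apply PySem.List.sorted_eq_of_perm_of_pairwise_lt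
  · refine (List.perm_ext_iff_of_nodup ?_ (PySem.Set.nodup_ofList _)).mpr ?_
    · exact hpw.imp ne_of_lt
    · intro x
      rw [hm x, PySem.Set.mem_ofList, List.mem_filter, PySem.List.mem_sorted]
      simp
  · exact hpw
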